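-- pv_equiv track=rewrite | github.com/n-lem/universidad | 2.Algoritmos y programación/Guia_02/Lemos_Nahuel_Clase_2_10.py | cargar_vector
-- ===== SOURCE A (Python) =====
-- def cargar_vector(n):
--     # Creo una lista vacía para almacenar los elementos
--     vector = []
--
--     # Uso un bucle for para recorrer los números desde 0 hasta n
--     for i in range(n):
--
--         # Si el número es par, agrego un 0 a la lista
--         if i % 2 == 0:
--             vector.append(0)
--         # Si el número es impar, agrego un 1 a la lista
--         else:
--             vector.append(1)
--         # Devuelvo la lista como resultado de la función
--     return vector
-- ===== SOURCE B (Python) =====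
-- def cargar_vector(n):
--     k = (n + 1) // 2
--     return ([0, 1] * k)[:n]
-- ===== Notes on version B (the rewrite author's own statement) =====
-- stated objective: idiomatic
-- what changed: Replaces the per-index loop with a parity test by tiling the two-element literal [0, 1] ceil(n/2) times and slicing to length n.
import Mathlib
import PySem

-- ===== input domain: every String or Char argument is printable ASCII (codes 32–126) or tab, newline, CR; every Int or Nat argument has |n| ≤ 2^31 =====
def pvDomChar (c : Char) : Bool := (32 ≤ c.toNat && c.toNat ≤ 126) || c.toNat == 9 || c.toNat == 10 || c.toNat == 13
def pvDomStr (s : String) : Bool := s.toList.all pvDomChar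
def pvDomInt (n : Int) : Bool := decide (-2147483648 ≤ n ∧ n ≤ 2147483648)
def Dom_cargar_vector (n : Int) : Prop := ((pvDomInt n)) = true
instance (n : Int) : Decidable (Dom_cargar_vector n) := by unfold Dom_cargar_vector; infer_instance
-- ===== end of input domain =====

-- B builds the alternating list by tiling [0, 1] ceil(n/2) times and slicing to length n, instead of A's per-index loop with a parity branch.


-- ===== PORT A =====
def cargar_vector (n : Int) : List Int :=
  (PySem.List.pyRange 0 n 1).foldl
    (fun vector i => if PySem.Int.mod i 2 == 0 then vector ++ [0] else vector ++ [1]) []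

-- ===== PORT B =====
def cargar_vector_alt (n : Int) : List Int :=
  let k : Int := PySem.Int.floordiv (n + 1) 2
  PySem.List.slice ((List.replicate k.toNat ([0, 1] : List Int)).flatten) none (some n)

-- ===== PRECONDITION & SPEC =====
def Spec_cargar_vector (n : Int) (out : List Int) : Prop := out = cargar_vector_alt n
instance (n : Int) (out : List Int) : Decidable (Spec_cargar_vector n out) := by unfold Spec_cargar_vector; infer_instance

-- ===== CLAIM (what is proved, stated in full; the proofs are below) =====
def Claim_equal_cargar_vector : Prop := ∀ (n : Int), Dom_cargar_vector n → Spec_cargar_vector n (cargar_vector n)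

-- ===== LEMMAS AND PROOFS =====

-- the common closed form: position k holds 0 if k is even, else 1
def pvBit (k : Nat) : Int := if k % 2 == 0 then 0 else 1

lemma cargar_vector_closed (m : Nat) :
    cargar_vector (m : Int) = (List.range m).map pvBit := by
  induction m with
  | zero => simp [cargar_vector, PySem.List.pyRange_one_eq_nil]
  | succ m ih =>
    have h : ((m : Int) + 1) = ((m + 1 : Nat) : Int) := by push_cast; ring
    have := PySem.List.pyRange_one_succ_right (a := 0) (b := (m : Int)) (by positivity)
    unfold cargar_vector at ih ⊢
    rw [← h, this, List.foldl_append, ih, List.range_succ, List.map_append]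
    have hm : ((m : Int)).fmod 2 = 0 ↔ m % 2 = 0 := by
      rw [Int.fmod_eq_emod_of_nonneg _ (by omega)]
      omega
    by_cases hp : m % 2 = 0 <;> simp [pvBit, PySem.Int.mod, hm, hp]

lemma flatten_replicate_pair (j : Nat) :
    (List.replicate j ([0, 1] : List Int)).flatten
      = (List.range (2 * j)).map pvBit := by
  induction j with
  | zero => simp
  | succ j ih =>
    rw [List.replicate_succ', List.flatten_append, ih]
    have h2 : 2 * (j + 1) = (2 * j + 1) + 1 := by ring
    rw [h2, List.range_succ, List.range_succ, List.map_append, List.map_append]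
    have e0 : pvBit (2 * j) = 0 := by simp [pvBit, Nat.mul_mod_right]
    have e1 : pvBit (2 * j + 1) = 1 := by simp [pvBit]
    simp [e0, e1]

lemma alt_closed (m : Nat) :
    cargar_vector_alt (m : Int) = (List.range m).map pvBit := by
  show PySem.List.slice
      ((List.replicate (PySem.Int.floordiv ((m : Int) + 1) 2).toNat ([0, 1] : List Int)).flatten)
      none (some (m : Int)) = _
  have hk : (PySem.Int.floordiv ((m : Int) + 1) 2).toNat = (m + 1) / 2 := by
    rw [PySem.Int.floordiv, Int.fdiv_eq_ediv_of_nonneg _ (by omega)]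
    omega
  rw [hk, flatten_replicate_pair, PySem.List.slice_to_natCast, ← List.map_take,
    List.take_range]
  have hmin : min m (2 * ((m + 1) / 2)) = m := by omega
  rw [hmin]

lemma cargar_vector_neg (n : Int) (h : n < 0) : cargar_vector n = [] := by
  unfold cargar_vector
  rw [PySem.List.pyRange_one_eq_nil (by omega)]
  rfl

lemma alt_neg (n : Int) (h : n < 0) : cargar_vector_alt n = [] := by
  show PySem.List.slice
      ((List.replicate (PySem.Int.floordiv (n + 1) 2).toNat ([0, 1] : List Int)).flatten)
      none (some n) = _
  have hk : (PySem.Int.floordiv (n + 1) 2).toNat = 0 := by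
    rw [PySem.Int.floordiv, Int.fdiv_eq_ediv_of_nonneg _ (by omega)]
    omega
  rw [hk]
  simp [PySem.List.slice]

-- ===== VERDICT (by name: the statement is the Claim_ definition above) =====
theorem cargar_vector_spec : Claim_equal_cargar_vector := by
  intro n _
  unfold Spec_cargar_vector
  rcases lt_or_ge n 0 with h | h
  · rw [cargar_vector_neg n h, alt_neg n h]
  · obtain ⟨m, rfl⟩ := Int.eq_ofNat_of_zero_le h
    rw [cargar_vector_closed, alt_closed]
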